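-- pv_equiv track=rewrite | github.com/SolomenkoIvan/Python_Lab | Lab №17/student_main.py | factorials_generator
-- ===== SOURCE A (Python) =====
-- def factorials_generator(n):
--     factorial = 1
--     for i in range(n + 1):
--         if i == 0:
--             yield 1
--         else:
--             factorial *= i
--             yield factorial
-- ===== SOURCE B (Python) =====
-- import math
--
-- def factorials_generator(n):
--     for i in range(n + 1):
--         yield math.factorial(i)
-- ===== Notes on version B (the rewrite author's own statement) =====
-- stated objective: idiomatic
-- what changed: B drops A's running-product accumulator and stateful if i==0 branch: each value is computed independently as math.factorial(i), so no state is carried between yields.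
import Mathlib
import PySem

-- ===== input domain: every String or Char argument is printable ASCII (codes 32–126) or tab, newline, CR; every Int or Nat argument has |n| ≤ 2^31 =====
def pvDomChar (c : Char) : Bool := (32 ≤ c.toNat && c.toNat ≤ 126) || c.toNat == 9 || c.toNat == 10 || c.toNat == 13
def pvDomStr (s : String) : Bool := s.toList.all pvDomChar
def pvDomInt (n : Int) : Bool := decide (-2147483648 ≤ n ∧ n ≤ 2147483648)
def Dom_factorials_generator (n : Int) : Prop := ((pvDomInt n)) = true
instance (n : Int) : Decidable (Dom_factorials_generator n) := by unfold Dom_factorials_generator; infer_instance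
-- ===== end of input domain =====

-- B drops A's running-product accumulator: each value is math.factorial(i), computed
-- independently per iteration (idiomatic; not faster).

-- ===== PORT A =====
-- A's generator: running product `factorial`, branch on i == 0, yields collected in order.
def factorials_generator (n : Int) : List Int :=
  ((PySem.List.pyRange 0 (n + 1) 1).foldl
    (fun (st : Int × List Int) i =>
      if i == 0 then (st.1, st.2 ++ [1])
      else (st.1 * i, st.2 ++ [st.1 * i]))
    (1, [])).2

-- ===== PORT B =====
-- math.factorial(i) ported as the library factorial on i.toNat (i ≥ 0 inside the range).
def factorials_generator_alt (n : Int) : List Int :=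
  (PySem.List.pyRange 0 (n + 1) 1).map (fun i => (Nat.factorial i.toNat : Int))

-- ===== PRECONDITION & SPEC =====
def Spec_factorials_generator (n : Int) (out : List Int) : Prop := out = factorials_generator_alt n
instance (n : Int) (out : List Int) : Decidable (Spec_factorials_generator n out) := by unfold Spec_factorials_generator; infer_instance

-- ===== CLAIM (what is proved, stated in full; the proofs are below) =====
def Claim_equal_factorials_generator : Prop := ∀ (n : Int), Dom_factorials_generator n → Spec_factorials_generator n (factorials_generator n)

-- ===== LEMMAS AND PROOFS =====

-- Loop invariant for A's fold over range(0, m): the carried product is (m-1)! and the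
-- emitted list is [0!, 1!, …, (m-1)!].
theorem factorials_loop_inv (m : Nat) :
    ((PySem.List.pyRange 0 (m : Int) 1).foldl
      (fun (st : Int × List Int) i =>
        if i == 0 then (st.1, st.2 ++ [1])
        else (st.1 * i, st.2 ++ [st.1 * i]))
      (1, []))
    = ((Nat.factorial (m - 1) : Int),
       (List.range m).map (fun k => (Nat.factorial k : Int))) := by
  induction m with
  | zero => simp [PySem.List.pyRange_one_eq_nil]
  | succ k ih =>
    have h : (((k : Nat) + 1 : Nat) : Int) = (k : Int) + 1 := by push_cast; ring
    rw [h, PySem.List.pyRange_one_succ_right (by positivity), List.foldl_append, ih]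
    simp only [List.foldl_cons, List.foldl_nil]
    rcases Nat.eq_zero_or_pos k with hk | hk
    · subst hk; simp [Nat.factorial]
    · have hne : ((k : Int) == 0) = false := by
        simp; omega
      rw [hne]
      have key : (Nat.factorial (k - 1) : Int) * k = (Nat.factorial k : Int) := by
        have hsp : (k - 1) + 1 = k := by omega
        calc (Nat.factorial (k - 1) : Int) * (k : Int)
            = ((Nat.factorial (k - 1) * k : Nat) : Int) := by push_cast; ring
          _ = (Nat.factorial k : Int) := by
              congr 1
              conv_rhs => rw [← hsp, Nat.factorial_succ, hsp]
              ring
      simp only [Bool.false_eq_true, if_false, List.range_succ, List.map_append,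
        List.map_cons, List.map_nil, key]
      simp

-- ===== VERDICT (by name: the statement is the Claim_ definition above) =====
theorem factorials_generator_spec : Claim_equal_factorials_generator := by
  intro n _
  unfold Spec_factorials_generator factorials_generator factorials_generator_alt
  rcases (by omega : n + 1 ≤ 0 ∨ 0 < n + 1) with h | h
  · rw [PySem.List.pyRange_one_eq_nil h]; simp
  · have hm : (n + 1) = (((n + 1).toNat : Nat) : Int) := by omega
    rw [hm, factorials_loop_inv, PySem.List.pyRange_one]
    simp only [sub_zero, zero_add, List.map_map, Int.toNat_natCast]
    exact List.map_congr_left (fun k _ => by simp)
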